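-- pv_equiv track=rewrite | github.com/Agv01/Sintaxis | Parser.py | automataPuntoyComa
-- ===== SOURCE A (Python) =====
-- ESTADO_FINAL = "ESTADO FINAL"
--
-- ESTADO_NO_FINAL = "NO ACEPTADO"
--
-- ESTADO_TRAMPA = "EN ESTADO TRAMPA"
--
-- def automataPuntoyComa(lexema):
--     estado = 0
--     estadoFinal = [1]
--     for caracter in lexema:
--         if estado == 0 and caracter == ";":
--             estado = 1
--         else:
--             estado = -1
--             break
--     if estado == -1:
--         return ESTADO_TRAMPA
--     elif estado in estadoFinal:
--         return ESTADO_FINAL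
--     else:
--         return ESTADO_NO_FINAL
-- ===== SOURCE B (Python) =====
-- ESTADO_FINAL = "ESTADO FINAL"
-- ESTADO_NO_FINAL = "NO ACEPTADO"
-- ESTADO_TRAMPA = "EN ESTADO TRAMPA"
--
-- def automataPuntoyComa(lexema):
--     if lexema == ";":
--         return ESTADO_FINAL
--     if lexema == "":
--         return ESTADO_NO_FINAL
--     return ESTADO_TRAMPA
-- ===== Notes on version B (the rewrite author's own statement) =====
-- stated objective: simpler
-- what changed: Replaced the character-by-character automaton loop (state machine with break-to-trap) by a direct whole-string comparison: ";" is final, "" is not final, anything else is trap.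
import Mathlib
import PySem

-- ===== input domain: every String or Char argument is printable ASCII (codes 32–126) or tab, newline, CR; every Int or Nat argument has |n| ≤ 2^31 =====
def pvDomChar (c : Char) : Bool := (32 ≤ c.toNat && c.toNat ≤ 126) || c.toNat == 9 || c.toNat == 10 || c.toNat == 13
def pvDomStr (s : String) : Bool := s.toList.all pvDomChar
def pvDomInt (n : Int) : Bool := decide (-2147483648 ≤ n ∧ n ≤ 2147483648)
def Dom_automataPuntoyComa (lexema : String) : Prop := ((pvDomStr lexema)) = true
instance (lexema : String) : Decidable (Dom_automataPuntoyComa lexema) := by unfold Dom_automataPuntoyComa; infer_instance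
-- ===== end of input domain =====

-- B replaces the one-state automaton loop by a direct whole-string comparison (simpler).
-- ===== PORT A =====
-- A's loop with break: recursion over the characters carrying the state; break returns -1 at once.
def pvLoopA : List Char → Int → Int
  | [], estado => estado
  | c :: rest, estado =>
      if estado = 0 ∧ c = ';' then pvLoopA rest 1
      else (-1 : Int)   -- 'estado = -1; break'

def automataPuntoyComa (lexema : String) : String :=
  let estado := pvLoopA lexema.toList 0
  if estado = -1 then "EN ESTADO TRAMPA"
  else if estado ∈ [(1 : Int)] then "ESTADO FINAL"
  else "NO ACEPTADO"

-- ===== PORT B =====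
def automataPuntoyComa_alt (lexema : String) : String :=
  if lexema = ";" then "ESTADO FINAL"
  else if lexema = "" then "NO ACEPTADO"
  else "EN ESTADO TRAMPA"

-- ===== PRECONDITION & SPEC =====
def Spec_automataPuntoyComa (lexema : String) (out : String) : Prop := out = automataPuntoyComa_alt lexema
instance (lexema : String) (out : String) : Decidable (Spec_automataPuntoyComa lexema out) := by unfold Spec_automataPuntoyComa; infer_instance

-- ===== CLAIM (what is proved, stated in full; the proofs are below) =====
def Claim_equal_automataPuntoyComa : Prop := ∀ (lexema : String), Dom_automataPuntoyComa lexema → Spec_automataPuntoyComa lexema (automataPuntoyComa lexema)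

-- ===== LEMMAS AND PROOFS =====

-- ===== VERDICT (by name: the statement is the Claim_ definition above) =====
theorem automataPuntoyComa_spec : Claim_equal_automataPuntoyComa := by
  intro lexema _
  unfold Spec_automataPuntoyComa automataPuntoyComa automataPuntoyComa_alt
  have hsemi : (lexema = ";") ↔ lexema.toList = [';'] := by
    rw [← String.toList_inj]; rfl
  have hempty : (lexema = "") ↔ lexema.toList = [] := by
    rw [← String.toList_inj]; rfl
  match hl : lexema.toList with
  | [] =>
      simp [pvLoopA, hsemi, hempty, hl]
  | [c] =>
      by_cases hc : c = ';'
      · simp [pvLoopA, hsemi, hl, hc]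
      · simp [pvLoopA, hsemi, hempty, hl, hc]
  | c :: d :: rest =>
      by_cases hc : c = ';'
      · simp [pvLoopA, hsemi, hempty, hl, hc]
      · simp [pvLoopA, hsemi, hempty, hl, hc]
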